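-- pv_equiv track=rewrite | github.com/frydaiii/trader-sentiment | symbols/fetch_hose_symbols.py | detect_exchange_column
-- ===== SOURCE A (Python) =====
-- from typing import Iterable
--
-- def detect_exchange_column(columns: Iterable[str]) -> str:
--     """Return the column name that carries exchange identifiers."""
--     normalized = {col.lower(): col for col in columns}
--     for candidate in ("exchange", "floor", "comgroupcode", "stock_exchange"):
--         if candidate in normalized:
--             return normalized[candidate]
--     raise ValueError(
--         "Could not find an exchange column; expected one of exchange/floor/comGroupCode"
--     )
-- ===== SOURCE B (Python) =====
-- _CANDIDATES = ("exchange", "floor", "comgroupcode", "stock_exchange")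
--
--
-- def detect_exchange_column(columns):
--     """Return the column name that carries exchange identifiers."""
--     best_rank = len(_CANDIDATES)
--     best_col = None
--     for col in columns:
--         low = col.lower()
--         if low in _CANDIDATES:
--             rank = _CANDIDATES.index(low)
--             if rank < best_rank:
--                 best_rank, best_col = rank, col
--     if best_col is None:
--         raise ValueError(
--             "Could not find an exchange column; expected one of exchange/floor/comGroupCode"
--         )
--     return best_col
-- ===== Notes on version B (the rewrite author's own statement) =====
-- stated objective: alternative
-- what changed: B replaces A's two-stage 'build a lowercased-key dict, then probe it with each candidate' by a single forward pass over the columns that tracks the best (lowest-priority-rank) matching column seen so far; Pre_ excludes the inputs where A raises ValueError (no candidate column) and lists where two differently-spelled columns lowercase to the same candidate name, on which A's dict-overwrite last-spelling-wins choice is accidental.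
-- outside the precondition, e.g. on detect_exchange_column(['Floor', 'FLOOR']): A returns 'FLOOR', B returns 'Floor'
import Mathlib
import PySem

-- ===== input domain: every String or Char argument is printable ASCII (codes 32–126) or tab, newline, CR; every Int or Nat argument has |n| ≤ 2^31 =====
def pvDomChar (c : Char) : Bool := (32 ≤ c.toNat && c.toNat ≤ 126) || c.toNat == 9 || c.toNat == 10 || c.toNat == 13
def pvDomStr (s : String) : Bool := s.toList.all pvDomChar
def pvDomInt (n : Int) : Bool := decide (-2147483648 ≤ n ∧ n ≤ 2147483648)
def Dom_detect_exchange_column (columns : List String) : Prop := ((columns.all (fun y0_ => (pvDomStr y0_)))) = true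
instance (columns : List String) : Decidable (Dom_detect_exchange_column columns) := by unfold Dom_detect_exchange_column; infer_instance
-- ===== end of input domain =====

-- B replaces A's lowercased-key dict + candidate probes by one forward pass tracking the best-ranked match (return value only; the ValueError inputs are excluded by Pre_).

-- ===== PORT A =====
-- A: build a dict from lowercased column name to column, then probe it with each candidate in order.
def pickA (d : PySem.Dict String String) : List String → Option String
  | [] => none
  | c :: rest =>
    match d.get? c with
    | some v => some v
    | none => pickA d rest

def detect_exchange_column (columns : List String) : String :=
  let normalized : PySem.Dict String String :=
    columns.foldl (fun d col => d.insert (PySem.Str.lower col) col) PySem.Dict.empty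
  (pickA normalized ["exchange", "floor", "comgroupcode", "stock_exchange"]).getD ""

-- ===== PORT B =====
def candsB : List String := ["exchange", "floor", "comgroupcode", "stock_exchange"]

-- B: single pass over the columns keeping (best_rank, best_col); best_col = none ports Python's None.
def stepB (best : Nat × Option String) (col : String) : Nat × Option String :=
  let low := PySem.Str.lower col
  if candsB.contains low then
    match PySem.List.index? candsB low with
    | some rank => if rank < best.1 then (rank, some col) else best
    | none => best
  else best

def detect_exchange_column_alt (columns : List String) : String :=
  let best := columns.foldl stepB (candsB.length, none)
  match best.2 with
  | some c => c
  | none => ""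

-- ===== PRECONDITION & SPEC =====
-- Pre_ excludes (a) the inputs on which the Python A raises ValueError (no column lowercases to a
-- candidate name) and (b) lists in which two differently-spelled columns lowercase to the same
-- candidate name: there A's dict-overwrite keeps the last spelling while B keeps the first, and
-- neither choice is specified.
def Pre_detect_exchange_column (columns : List String) : Prop :=
  (columns.any (fun col => candsB.contains (PySem.Str.lower col))) = true ∧
  ∀ c ∈ candsB, ∀ x ∈ columns, ∀ y ∈ columns,
    PySem.Str.lower x = c → PySem.Str.lower y = c → x = y
instance (columns : List String) : Decidable (Pre_detect_exchange_column columns) := by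
  unfold Pre_detect_exchange_column; infer_instance
def pvWitness_detect_exchange_column : List String := ["Ticker", "Floor"]

def Spec_detect_exchange_column (columns : List String) (out : String) : Prop := out = detect_exchange_column_alt columns
instance (columns : List String) (out : String) : Decidable (Spec_detect_exchange_column columns out) := by unfold Spec_detect_exchange_column; infer_instance

-- ===== CLAIM (what is proved, stated in full; the proofs are below) =====
def Claim_equal_detect_exchange_column : Prop := ∀ (columns : List String), Dom_detect_exchange_column columns → Pre_detect_exchange_column columns → Spec_detect_exchange_column columns (detect_exchange_column columns)

-- ===== LEMMAS AND PROOFS =====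

-- proof-side: A's probe loop rephrased as per-candidate reverse scans, then forward scans.
def pickRev (cols : List String) : List String → Option String
  | [] => none
  | c :: rest =>
    match cols.reverse.find? (fun col => PySem.Str.lower col == c) with
    | some v => some v
    | none => pickRev cols rest

def pickF (cols : List String) : List String → Option String
  | [] => none
  | c :: rest =>
    match cols.find? (fun col => PySem.Str.lower col == c) with
    | some v => some v
    | none => pickF cols rest

-- the dict built by the insert loop looks up to the last column with the matching lowercase
theorem get?_foldl_insert_lower (cols : List String) (d : PySem.Dict String String) (k : String) :
    (cols.foldl (fun d col => d.insert (PySem.Str.lower col) col) d).get? k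
      = ((cols.reverse.find? (fun col => PySem.Str.lower col == k)).or (d.get? k)) := by
  induction cols generalizing d with
  | nil => simp
  | cons c rest ih =>
    simp only [List.foldl_cons, List.reverse_cons, List.find?_append, ih]
    cases h : rest.reverse.find? (fun col => PySem.Str.lower col == k) with
    | some v => simp
    | none =>
      simp only [Option.none_or, List.find?_cons, List.find?_nil]
      rw [PySem.Dict.get?_insert]
      by_cases hk : PySem.Str.lower c = k
      · simp [hk]
      · have : (PySem.Str.lower c == k) = false := by simp [hk]
        simp [this, Ne.symm hk]

theorem pickA_eq_pickRev (cols : List String) (cands : List String) :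
    pickA (cols.foldl (fun d col => d.insert (PySem.Str.lower col) col) PySem.Dict.empty) cands
      = pickRev cols cands := by
  induction cands with
  | nil => rfl
  | cons c rest ih =>
    simp only [pickA, pickRev, get?_foldl_insert_lower, ih]
    cases h : cols.reverse.find? (fun col => PySem.Str.lower col == c) with
    | some v => simp
    | none => simp [PySem.Dict.empty, PySem.Dict.get?]

-- when all satisfiers of p are equal, scanning from either end finds the same value
theorem find?_reverse_of_unique {α : Type} (p : α → Bool) (xs : List α)
    (h : ∀ a ∈ xs, ∀ b ∈ xs, p a = true → p b = true → a = b) :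
    xs.reverse.find? p = xs.find? p := by
  cases hf : xs.find? p with
  | none =>
    rw [List.find?_eq_none] at hf
    rw [List.find?_eq_none]
    intro a ha; exact hf a (by simpa using ha)
  | some a =>
    have hmem : a ∈ xs := List.mem_of_find?_eq_some hf
    have hpa : p a = true := List.find?_some hf
    cases hr : xs.reverse.find? p with
    | none =>
      rw [List.find?_eq_none] at hr
      exact absurd hpa (hr a (by simpa using hmem))
    | some b =>
      have hbm : b ∈ xs := by simpa using List.mem_of_find?_eq_some hr
      have hpb : p b = true := List.find?_some hr
      rw [h b hbm a hmem hpb hpa]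

theorem pickRev_eq_pickF (cols : List String)
    (h : ∀ c ∈ candsB, ∀ x ∈ cols, ∀ y ∈ cols,
      PySem.Str.lower x = c → PySem.Str.lower y = c → x = y) :
    pickRev cols candsB = pickF cols candsB := by
  have key : ∀ cands : List String, (∀ c ∈ cands, c ∈ candsB) →
      pickRev cols cands = pickF cols cands := by
    intro cands hsub
    induction cands with
    | nil => rfl
    | cons c rest ih =>
      have hc : c ∈ candsB := hsub c (by simp)
      have : cols.reverse.find? (fun col => PySem.Str.lower col == c)
          = cols.find? (fun col => PySem.Str.lower col == c) := by
        apply find?_reverse_of_unique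
        intro a ha b hb hpa hpb
        exact h c hc a ha b hb (by simpa using hpa) (by simpa using hpb)
      simp only [pickRev, pickF, this]
      cases cols.find? (fun col => PySem.Str.lower col == c) with
      | some v => rfl
      | none => exact ih (fun d hd => hsub d (by simp [hd]))
  exact key candsB (fun c hc => hc)

theorem pickF_nil (cands : List String) : pickF [] cands = none := by
  induction cands with
  | nil => rfl
  | cons c rest ih => simp [pickF, ih]

theorem pickF_cons_nomatch (x : String) (xs : List String) (cands : List String)
    (h : ∀ c ∈ cands, PySem.Str.lower x ≠ c) :
    pickF (x :: xs) cands = pickF xs cands := by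
  induction cands with
  | nil => rfl
  | cons c rest ih =>
    have hx : (PySem.Str.lower x == c) = false := by
      simp [h c (by simp)]
    simp only [pickF, List.find?_cons, hx]
    cases xs.find? (fun col => PySem.Str.lower col == c) with
    | some v => rfl
    | none => exact ih (fun d hd => h d (by simp [hd]))

-- the fold started at threshold b records exactly pickF over the first b candidates
theorem foldl_stepB_eq_pickF (cols : List String) :
    ∀ (b : Nat) (o : Option String), b ≤ 4 →
    (cols.foldl stepB (b, o)).2
      = match pickF cols (candsB.take b) with
        | some v => some v
        | none => o := by
  induction cols with
  | nil => intro b o _; simp [pickF_nil]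
  | cons x xs ih =>
    intro b o hb
    simp only [List.foldl_cons]
    by_cases hmem : candsB.contains (PySem.Str.lower x)
    · have hx : PySem.Str.lower x ∈ candsB := by simpa using hmem
      have hcases : PySem.Str.lower x = "exchange" ∨ PySem.Str.lower x = "floor" ∨
             PySem.Str.lower x = "comgroupcode" ∨ PySem.Str.lower x = "stock_exchange" := by
        simpa [candsB] using hx
      rcases hcases with hlow | hlow | hlow | hlow
      · -- lower x = "exchange" (rank 0)
        have hcon : candsB.contains (PySem.Str.lower x) = true := by rw [hlow]; decide
        have hidx : PySem.List.index? candsB (PySem.Str.lower x) = some 0 := by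
          rw [hlow]; decide
        have hstep : stepB (b, o) x = if 0 < b then (0, some x) else (b, o) := by
          simp only [stepB]
          rw [if_pos hcon, hidx]
        have hb0 : (PySem.Str.lower x == "exchange") = true := by rw [hlow]; decide
        have hb1 : (PySem.Str.lower x == "floor") = false := by rw [hlow]; decide
        have hb2 : (PySem.Str.lower x == "comgroupcode") = false := by rw [hlow]; decide
        have hb3 : (PySem.Str.lower x == "stock_exchange") = false := by rw [hlow]; decide
        rw [hstep]
        interval_cases b
        case _ =>
          (rw [if_neg (by omega), ih 0 o (by omega),
                pickF_cons_nomatch x xs _ (by rw [hlow]; decide)])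
        case _ =>
          (rw [if_pos (by omega), ih 0 (some x) (by omega)]
           simp only [candsB, List.take, pickF, List.find?_cons, hb0, cond_true])
        case _ =>
          (rw [if_pos (by omega), ih 0 (some x) (by omega)]
           simp only [candsB, List.take, pickF, List.find?_cons, hb0, cond_true])
        case _ =>
          (rw [if_pos (by omega), ih 0 (some x) (by omega)]
           simp only [candsB, List.take, pickF, List.find?_cons, hb0, cond_true])
        case _ =>
          (rw [if_pos (by omega), ih 0 (some x) (by omega)]
           simp only [candsB, List.take, pickF, List.find?_cons, hb0, cond_true])
      · -- lower x = "floor" (rank 1)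
        have hcon : candsB.contains (PySem.Str.lower x) = true := by rw [hlow]; decide
        have hidx : PySem.List.index? candsB (PySem.Str.lower x) = some 1 := by
          rw [hlow]; decide
        have hstep : stepB (b, o) x = if 1 < b then (1, some x) else (b, o) := by
          simp only [stepB]
          rw [if_pos hcon, hidx]
        have hb0 : (PySem.Str.lower x == "exchange") = false := by rw [hlow]; decide
        have hb1 : (PySem.Str.lower x == "floor") = true := by rw [hlow]; decide
        have hb2 : (PySem.Str.lower x == "comgroupcode") = false := by rw [hlow]; decide
        have hb3 : (PySem.Str.lower x == "stock_exchange") = false := by rw [hlow]; decide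
        rw [hstep]
        interval_cases b
        case _ =>
          (rw [if_neg (by omega), ih 0 o (by omega),
                pickF_cons_nomatch x xs _ (by rw [hlow]; decide)])
        case _ =>
          (rw [if_neg (by omega), ih 1 o (by omega),
                pickF_cons_nomatch x xs _ (by rw [hlow]; decide)])
        case _ =>
          (rw [if_pos (by omega), ih 1 (some x) (by omega)]
           simp only [candsB, List.take, pickF, List.find?_cons, hb0, hb1, hb2, hb3,
             cond_true, cond_false]
           all_goals cases h0 : xs.find? (fun col => PySem.Str.lower col == "exchange") <;>
             cases h1 : xs.find? (fun col => PySem.Str.lower col == "floor") <;>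
               cases h2 : xs.find? (fun col => PySem.Str.lower col == "comgroupcode") <;>
                 simp [h0, h1, h2])
        case _ =>
          (rw [if_pos (by omega), ih 1 (some x) (by omega)]
           simp only [candsB, List.take, pickF, List.find?_cons, hb0, hb1, hb2, hb3,
             cond_true, cond_false]
           all_goals cases h0 : xs.find? (fun col => PySem.Str.lower col == "exchange") <;>
             cases h1 : xs.find? (fun col => PySem.Str.lower col == "floor") <;>
               cases h2 : xs.find? (fun col => PySem.Str.lower col == "comgroupcode") <;>
                 simp [h0, h1, h2])
        case _ =>
          (rw [if_pos (by omega), ih 1 (some x) (by omega)]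
           simp only [candsB, List.take, pickF, List.find?_cons, hb0, hb1, hb2, hb3,
             cond_true, cond_false]
           all_goals cases h0 : xs.find? (fun col => PySem.Str.lower col == "exchange") <;>
             cases h1 : xs.find? (fun col => PySem.Str.lower col == "floor") <;>
               cases h2 : xs.find? (fun col => PySem.Str.lower col == "comgroupcode") <;>
                 simp [h0, h1, h2])
      · -- lower x = "comgroupcode" (rank 2)
        have hcon : candsB.contains (PySem.Str.lower x) = true := by rw [hlow]; decide
        have hidx : PySem.List.index? candsB (PySem.Str.lower x) = some 2 := by
          rw [hlow]; decide
        have hstep : stepB (b, o) x = if 2 < b then (2, some x) else (b, o) := by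
          simp only [stepB]
          rw [if_pos hcon, hidx]
        have hb0 : (PySem.Str.lower x == "exchange") = false := by rw [hlow]; decide
        have hb1 : (PySem.Str.lower x == "floor") = false := by rw [hlow]; decide
        have hb2 : (PySem.Str.lower x == "comgroupcode") = true := by rw [hlow]; decide
        have hb3 : (PySem.Str.lower x == "stock_exchange") = false := by rw [hlow]; decide
        rw [hstep]
        interval_cases b
        case _ =>
          (rw [if_neg (by omega), ih 0 o (by omega),
                pickF_cons_nomatch x xs _ (by rw [hlow]; decide)])
        case _ =>
          (rw [if_neg (by omega), ih 1 o (by omega),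
                pickF_cons_nomatch x xs _ (by rw [hlow]; decide)])
        case _ =>
          (rw [if_neg (by omega), ih 2 o (by omega),
                pickF_cons_nomatch x xs _ (by rw [hlow]; decide)])
        case _ =>
          (rw [if_pos (by omega), ih 2 (some x) (by omega)]
           simp only [candsB, List.take, pickF, List.find?_cons, hb0, hb1, hb2, hb3,
             cond_true, cond_false]
           all_goals cases h0 : xs.find? (fun col => PySem.Str.lower col == "exchange") <;>
             cases h1 : xs.find? (fun col => PySem.Str.lower col == "floor") <;>
               cases h2 : xs.find? (fun col => PySem.Str.lower col == "comgroupcode") <;>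
                 simp [h0, h1, h2])
        case _ =>
          (rw [if_pos (by omega), ih 2 (some x) (by omega)]
           simp only [candsB, List.take, pickF, List.find?_cons, hb0, hb1, hb2, hb3,
             cond_true, cond_false]
           all_goals cases h0 : xs.find? (fun col => PySem.Str.lower col == "exchange") <;>
             cases h1 : xs.find? (fun col => PySem.Str.lower col == "floor") <;>
               cases h2 : xs.find? (fun col => PySem.Str.lower col == "comgroupcode") <;>
                 simp [h0, h1, h2])
      · -- lower x = "stock_exchange" (rank 3)
        have hcon : candsB.contains (PySem.Str.lower x) = true := by rw [hlow]; decide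
        have hidx : PySem.List.index? candsB (PySem.Str.lower x) = some 3 := by
          rw [hlow]; decide
        have hstep : stepB (b, o) x = if 3 < b then (3, some x) else (b, o) := by
          simp only [stepB]
          rw [if_pos hcon, hidx]
        have hb0 : (PySem.Str.lower x == "exchange") = false := by rw [hlow]; decide
        have hb1 : (PySem.Str.lower x == "floor") = false := by rw [hlow]; decide
        have hb2 : (PySem.Str.lower x == "comgroupcode") = false := by rw [hlow]; decide
        have hb3 : (PySem.Str.lower x == "stock_exchange") = true := by rw [hlow]; decide
        rw [hstep]
        interval_cases b
        case _ =>
          (rw [if_neg (by omega), ih 0 o (by omega),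
                pickF_cons_nomatch x xs _ (by rw [hlow]; decide)])
        case _ =>
          (rw [if_neg (by omega), ih 1 o (by omega),
                pickF_cons_nomatch x xs _ (by rw [hlow]; decide)])
        case _ =>
          (rw [if_neg (by omega), ih 2 o (by omega),
                pickF_cons_nomatch x xs _ (by rw [hlow]; decide)])
        case _ =>
          (rw [if_neg (by omega), ih 3 o (by omega),
                pickF_cons_nomatch x xs _ (by rw [hlow]; decide)])
        case _ =>
          (rw [if_pos (by omega), ih 3 (some x) (by omega)]
           simp only [candsB, List.take, pickF, List.find?_cons, hb0, hb1, hb2, hb3,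
             cond_true, cond_false]
           all_goals cases h0 : xs.find? (fun col => PySem.Str.lower col == "exchange") <;>
             cases h1 : xs.find? (fun col => PySem.Str.lower col == "floor") <;>
               cases h2 : xs.find? (fun col => PySem.Str.lower col == "comgroupcode") <;>
                 simp [h0, h1, h2])
    · -- x matches no candidate: the step keeps the accumulator and pickF skips x
      have hstep : stepB (b, o) x = (b, o) := by
        simp only [stepB]
        rw [if_neg hmem]
      rw [hstep, ih b o hb, pickF_cons_nomatch]
      intro c hc heq
      apply hmem
      rw [heq]
      simpa using List.mem_of_mem_take hc

-- ===== VERDICT (by name: the statement is the Claim_ definition above) =====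
theorem detect_exchange_column_spec : Claim_equal_detect_exchange_column := by
  intro columns _ hpre
  unfold Spec_detect_exchange_column
  simp only [detect_exchange_column, detect_exchange_column_alt]
  rw [pickA_eq_pickRev,
    show (["exchange", "floor", "comgroupcode", "stock_exchange"] : List String) = candsB from rfl,
    pickRev_eq_pickF columns hpre.2,
    foldl_stepB_eq_pickF columns candsB.length none (by decide)]
  rw [show candsB.take candsB.length = candsB from rfl]
  cases pickF columns candsB with
  | some v => rfl
  | none => rfl
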